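-- pv_equiv track=rewrite | github.com/alshmrani25/pythonAI | pythonAI/optimization04/search_classes.py | get_heuristic_value
-- ===== SOURCE A (Python) =====
-- def get_heuristic_value(nodeState):
--     #For this problem, the number of "attacks" possible between queens
--     total = 0
--     for index, value in enumerate(nodeState):
--         foundLeftRowHit = False
--         foundLeftUpDiagHit = False
--         foundLeftDownDiagHit = False
--         foundRightRowHit = False
--         foundRightUpDiagHit = False
--         foundRightDownDiagHit = False
--         leftUpDiag = value
--         leftDownDiag = value
--         rightUpDiag = value
--         rightDownDiag = value
--         for leftIndex in range(index - 1, -1, -1):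
--             leftUpDiag = leftUpDiag + 1
--             leftDownDiag = leftDownDiag - 1
--             if value == nodeState[leftIndex]:
--                 foundLeftRowHit = True
--             if leftUpDiag == nodeState[leftIndex]:
--                 foundLeftUpDiagHit = True
--             if leftDownDiag == nodeState[leftIndex]:
--                 foundLeftDownDiagHit = True
--         for rightIndex in range(index + 1, len(nodeState), 1):
--             rightUpDiag = rightUpDiag + 1
--             rightDownDiag = rightDownDiag - 1
--             if value == nodeState[rightIndex]:
--                 foundRightRowHit = True
--             if rightUpDiag == nodeState[rightIndex]:
--                 foundRightUpDiagHit = True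
--             if rightDownDiag == nodeState[rightIndex]:
--                 foundRightDownDiagHit = True
--         if foundLeftRowHit:
--             total = total + 1
--         if foundLeftUpDiagHit:
--             total = total + 1
--         if foundLeftDownDiagHit:
--             total = total + 1
--         if foundRightRowHit:
--             total = total + 1
--         if foundRightUpDiagHit:
--             total = total + 1
--         if foundRightDownDiagHit:
--             total = total + 1
--
--     #need to return a "maximizing" heuristic
--     return 100 - total
-- ===== SOURCE B (Python) =====
-- def get_heuristic_value(nodeState):
--     total = 0
--     # left-side hits: one forward pass keeping the rows / diagonals already seen
--     rows, mains, antis = set(), set(), set()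
--     for i, v in enumerate(nodeState):
--         total += (v in rows) + (v - i in mains) + (v + i in antis)
--         rows.add(v)
--         mains.add(v - i)
--         antis.add(v + i)
--     # right-side hits: one backward pass, symmetric
--     rows, mains, antis = set(), set(), set()
--     for i in range(len(nodeState) - 1, -1, -1):
--         v = nodeState[i]
--         total += (v in rows) + (v - i in mains) + (v + i in antis)
--         rows.add(v)
--         mains.add(v - i)
--         antis.add(v + i)
--     return 100 - total
-- ===== Notes on version B (the rewrite author's own statement) =====
-- stated objective: faster
-- what changed: Replaced the per-queen left/right rescans by two linear passes that maintain sets of already-seen row, main-diagonal (v-i) and anti-diagonal (v+i) keys, so each queen's six hit tests become O(1) set lookups.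
import Mathlib
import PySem

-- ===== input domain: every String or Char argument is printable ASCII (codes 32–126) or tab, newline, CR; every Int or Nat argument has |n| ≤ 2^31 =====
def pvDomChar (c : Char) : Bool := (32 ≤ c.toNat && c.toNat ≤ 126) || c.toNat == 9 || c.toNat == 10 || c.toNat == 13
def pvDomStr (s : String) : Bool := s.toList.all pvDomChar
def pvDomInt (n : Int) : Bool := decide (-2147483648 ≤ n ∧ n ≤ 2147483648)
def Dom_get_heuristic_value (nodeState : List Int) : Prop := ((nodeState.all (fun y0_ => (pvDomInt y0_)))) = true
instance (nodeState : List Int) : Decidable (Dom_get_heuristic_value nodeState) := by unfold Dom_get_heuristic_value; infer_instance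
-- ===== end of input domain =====

-- B replaces A's per-queen quadratic left/right rescans by two linear passes over
-- sets of already-seen row / main-diagonal (v-i) / anti-diagonal (v+i) keys (objective: faster).


-- ===== PORT A =====
-- body of both inner scans: bump the two diagonal trackers, compare against nodeState[j]
def pvAStep (nodeState : List Int) (value : Int)
    (s : Bool × Bool × Bool × Int × Int) (j : Int) : Bool × Bool × Bool × Int × Int :=
  let up := s.2.2.2.1 + 1
  let down := s.2.2.2.2 - 1
  (if value == PySem.List.pyGetD nodeState j 0 then true else s.1,
   if up == PySem.List.pyGetD nodeState j 0 then true else s.2.1,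
   if down == PySem.List.pyGetD nodeState j 0 then true else s.2.2.1,
   up, down)

def get_heuristic_value (nodeState : List Int) : Int :=
  let total : Int :=
    (PySem.List.enumerate nodeState 0).foldl (fun total p =>
      let index := p.1
      let value := p.2
      let sL := (PySem.List.pyRange (index - 1) (-1) (-1)).foldl
        (pvAStep nodeState value) (false, false, false, value, value)
      let sR := (PySem.List.pyRange (index + 1) ((nodeState.length : Int)) 1).foldl
        (pvAStep nodeState value) (false, false, false, value, value)
      let total := if sL.1 then total + 1 else total
      let total := if sL.2.1 then total + 1 else total
      let total := if sL.2.2.1 then total + 1 else total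
      let total := if sR.1 then total + 1 else total
      let total := if sR.2.1 then total + 1 else total
      let total := if sR.2.2.1 then total + 1 else total
      total) 0
  100 - total

-- ===== PORT B =====
-- one step of B's passes: count the O(1) set hits for queen (i, v), then record its keys
def pvBStep (s : Int × PySem.Set Int × PySem.Set Int × PySem.Set Int) (p : Int × Int) :
    Int × PySem.Set Int × PySem.Set Int × PySem.Set Int :=
  let i := p.1
  let v := p.2
  (s.1 + (if PySem.Set.contains s.2.1 v then 1 else 0)
       + (if PySem.Set.contains s.2.2.1 (v - i) then 1 else 0)
       + (if PySem.Set.contains s.2.2.2 (v + i) then 1 else 0),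
   PySem.Set.add s.2.1 v, PySem.Set.add s.2.2.1 (v - i), PySem.Set.add s.2.2.2 (v + i))

def get_heuristic_value_alt (nodeState : List Int) : Int :=
  let s1 := (PySem.List.enumerate nodeState 0).foldl pvBStep
    (0, PySem.Set.empty, PySem.Set.empty, PySem.Set.empty)
  let s2 := (PySem.List.pyRange ((nodeState.length : Int) - 1) (-1) (-1)).foldl
    (fun s i => pvBStep s (i, PySem.List.pyGetD nodeState i 0))
    (s1.1, PySem.Set.empty, PySem.Set.empty, PySem.Set.empty)
  100 - s2.1

-- ===== PRECONDITION & SPEC =====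
def Spec_get_heuristic_value (nodeState : List Int) (out : Int) : Prop := out = get_heuristic_value_alt nodeState
instance (nodeState : List Int) (out : Int) : Decidable (Spec_get_heuristic_value nodeState out) := by unfold Spec_get_heuristic_value; infer_instance

-- ===== CLAIM (what is proved, stated in full; the proofs are below) =====
def Claim_equal_get_heuristic_value : Prop := ∀ (nodeState : List Int), Dom_get_heuristic_value nodeState → Spec_get_heuristic_value nodeState (get_heuristic_value nodeState)

-- ===== LEMMAS AND PROOFS =====

-- nodeState[j] as an Int-indexed total lookup (all uses are in range)
def pvG (ns : List Int) (j : Int) : Int := PySem.List.pyGetD ns j 0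

-- the six per-queen hit indicators, as membership over an index range
def pvHits (ns : List Int) (i v lo hi : Int) : Int :=
  (if ∃ j ∈ PySem.List.pyRange lo hi 1, pvG ns j = v then (1:Int) else 0)
  + (if ∃ j ∈ PySem.List.pyRange lo hi 1, pvG ns j - j = v - i then (1:Int) else 0)
  + (if ∃ j ∈ PySem.List.pyRange lo hi 1, pvG ns j + j = v + i then (1:Int) else 0)

def pvSpecTotal (ns : List Int) : Int :=
  ((PySem.List.pyRange 0 (ns.length : Int) 1).map
    (fun i => pvHits ns i (pvG ns i) 0 i + pvHits ns i (pvG ns i) (i + 1) (ns.length : Int))).sum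

lemma pvIteTrue (c b : Bool) : (if c then true else b) = (c || b) := by
  cases c <;> simp

lemma pvIteAdd (c : Bool) (t : Int) : (if c then t + 1 else t) = t + (if c then (1:Int) else 0) := by
  cases c <;> simp

lemma pvOr (a b c : Bool) : ((a || b) || c) = (b || (a || c)) := by
  cases a <;> cases b <;> simp

-- A's left scan, characterized (countdown range, induction on j0+1)
lemma pvAStep_countdown (ns : List Int) (v : Int) :
    ∀ (k : Nat) (j0 : Int), j0 + 1 = (k : Int) → ∀ (f1 f2 f3 : Bool) (u d : Int),
    (PySem.List.pyRange j0 (-1) (-1)).foldl (pvAStep ns v) (f1, f2, f3, u, d)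
    = (f1 || (PySem.List.pyRange j0 (-1) (-1)).any (fun j => v == pvG ns j),
       f2 || (PySem.List.pyRange j0 (-1) (-1)).any (fun j => u + (j0 - j) + 1 == pvG ns j),
       f3 || (PySem.List.pyRange j0 (-1) (-1)).any (fun j => d - (j0 - j) - 1 == pvG ns j),
       u + (j0 + 1), d - (j0 + 1)) := by
  intro k
  induction k with
  | zero =>
    intro j0 h f1 f2 f3 u d
    have hj : j0 = -1 := by omega
    subst hj
    rw [PySem.List.pyRange_neg_one_eq_nil (by omega)]
    simp
  | succ k ih =>
    intro j0 h f1 f2 f3 u d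
    rw [PySem.List.pyRange_neg_one_cons (show (-1:Int) < j0 by omega)]
    rw [List.foldl_cons]
    have hstep : pvAStep ns v (f1, f2, f3, u, d) j0
        = (if v == pvG ns j0 then true else f1,
           if u + 1 == pvG ns j0 then true else f2,
           if d - 1 == pvG ns j0 then true else f3, u + 1, d - 1) := rfl
    rw [hstep, ih (j0 - 1) (by omega)]
    have e2 : ∀ j ∈ PySem.List.pyRange (j0 - 1) (-1) (-1),
        ((u + 1) + ((j0 - 1) - j) + 1 == pvG ns j) = (u + (j0 - j) + 1 == pvG ns j) := by
      intro j _
      rw [show (u + 1) + ((j0 - 1) - j) + 1 = u + (j0 - j) + 1 from by ring]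
    have e3 : ∀ j ∈ PySem.List.pyRange (j0 - 1) (-1) (-1),
        ((d - 1) - ((j0 - 1) - j) - 1 == pvG ns j) = (d - (j0 - j) - 1 == pvG ns j) := by
      intro j _
      rw [show (d - 1) - ((j0 - 1) - j) - 1 = d - (j0 - j) - 1 from by ring]
    rw [PySem.List.any_congr_mem e2, PySem.List.any_congr_mem e3]
    simp only [List.any_cons, Prod.mk.injEq, pvIteTrue]
    refine ⟨?_, ?_, ?_, by ring, by ring⟩
    · exact pvOr _ _ _
    · rw [show u + (j0 - j0) + 1 = u + 1 from by ring]
      exact pvOr _ _ _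
    · rw [show d - (j0 - j0) - 1 = d - 1 from by ring]
      exact pvOr _ _ _

-- A's right scan, characterized (ascending range, induction on b - j0)
lemma pvAStep_up (ns : List Int) (v b : Int) :
    ∀ (k : Nat) (j0 : Int), b - j0 = (k : Int) → ∀ (f1 f2 f3 : Bool) (u d : Int),
    (PySem.List.pyRange j0 b 1).foldl (pvAStep ns v) (f1, f2, f3, u, d)
    = (f1 || (PySem.List.pyRange j0 b 1).any (fun j => v == pvG ns j),
       f2 || (PySem.List.pyRange j0 b 1).any (fun j => u + (j - j0) + 1 == pvG ns j),
       f3 || (PySem.List.pyRange j0 b 1).any (fun j => d - (j - j0) - 1 == pvG ns j),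
       u + (b - j0), d - (b - j0)) := by
  intro k
  induction k with
  | zero =>
    intro j0 h f1 f2 f3 u d
    rw [PySem.List.pyRange_one_eq_nil (by omega)]
    simp [show b - j0 = 0 from by omega]
  | succ k ih =>
    intro j0 h f1 f2 f3 u d
    rw [PySem.List.pyRange_one_cons (show j0 < b by omega)]
    rw [List.foldl_cons]
    have hstep : pvAStep ns v (f1, f2, f3, u, d) j0
        = (if v == pvG ns j0 then true else f1,
           if u + 1 == pvG ns j0 then true else f2,
           if d - 1 == pvG ns j0 then true else f3, u + 1, d - 1) := rfl
    rw [hstep, ih (j0 + 1) (by omega)]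
    have e2 : ∀ j ∈ PySem.List.pyRange (j0 + 1) b 1,
        ((u + 1) + (j - (j0 + 1)) + 1 == pvG ns j) = (u + (j - j0) + 1 == pvG ns j) := by
      intro j _
      rw [show (u + 1) + (j - (j0 + 1)) + 1 = u + (j - j0) + 1 from by ring]
    have e3 : ∀ j ∈ PySem.List.pyRange (j0 + 1) b 1,
        ((d - 1) - (j - (j0 + 1)) - 1 == pvG ns j) = (d - (j - j0) - 1 == pvG ns j) := by
      intro j _
      rw [show (d - 1) - (j - (j0 + 1)) - 1 = d - (j - j0) - 1 from by ring]
    rw [PySem.List.any_congr_mem e2, PySem.List.any_congr_mem e3]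
    simp only [List.any_cons, Prod.mk.injEq, pvIteTrue]
    refine ⟨?_, ?_, ?_, by ring, by ring⟩
    · exact pvOr _ _ _
    · rw [show u + (j0 - j0) + 1 = u + 1 from by ring]
      exact pvOr _ _ _
    · rw [show d - (j0 - j0) - 1 = d - 1 from by ring]
      exact pvOr _ _ _

-- running sum of B's pass, as a recursion over the remaining (index, value) pairs
def pvSpan (R M A : PySem.Set Int) : List (Int × Int) → Int
  | [] => 0
  | p :: l =>
    ((if PySem.Set.contains R p.2 then (1:Int) else 0)
      + (if PySem.Set.contains M (p.2 - p.1) then (1:Int) else 0)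
      + (if PySem.Set.contains A (p.2 + p.1) then (1:Int) else 0))
    + pvSpan (PySem.Set.add R p.2) (PySem.Set.add M (p.2 - p.1)) (PySem.Set.add A (p.2 + p.1)) l

lemma pvBfold (l : List (Int × Int)) :
    ∀ (t : Int) (R M A : PySem.Set Int),
    (l.foldl pvBStep (t, R, M, A)).1 = t + pvSpan R M A l := by
  induction l with
  | nil => intro t R M A; simp [pvSpan]
  | cons p l ih =>
    intro t R M A
    rw [List.foldl_cons]
    have hstep : pvBStep (t, R, M, A) p
        = (t + (if PySem.Set.contains R p.2 then (1:Int) else 0)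
             + (if PySem.Set.contains M (p.2 - p.1) then (1:Int) else 0)
             + (if PySem.Set.contains A (p.2 + p.1) then (1:Int) else 0),
           PySem.Set.add R p.2, PySem.Set.add M (p.2 - p.1), PySem.Set.add A (p.2 + p.1)) := rfl
    rw [hstep, ih]
    simp only [pvSpan]
    ring

lemma pvG_def (ns : List Int) (j : Int) : pvG ns j = PySem.List.pyGetD ns j 0 := rfl

lemma pvMemSnoc (f : Int → Int) (R : PySem.Set Int) (a : Int) (h0 : 0 ≤ a)
    (hR : ∀ x, x ∈ R ↔ ∃ j ∈ PySem.List.pyRange 0 a 1, f j = x) :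
    ∀ x, x ∈ PySem.Set.add R (f a) ↔ ∃ j ∈ PySem.List.pyRange 0 (a + 1) 1, f j = x := by
  intro x
  rw [PySem.Set.mem_add, hR, PySem.List.pyRange_one_succ_right h0]
  constructor
  · rintro (⟨j, hj, e⟩ | e)
    · exact ⟨j, List.mem_append_left _ hj, e⟩
    · exact ⟨a, List.mem_append_right _ (List.mem_singleton_self a), e.symm⟩
  · rintro ⟨j, hj, e⟩
    rcases List.mem_append.mp hj with hj | hj
    · exact Or.inl ⟨j, hj, e⟩
    · rw [List.mem_singleton] at hj
      subst hj
      exact Or.inr e.symm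

lemma pvMemConsDown (f : Int → Int) (R : PySem.Set Int) (a n : Int) (ha : a < n)
    (hR : ∀ x, x ∈ R ↔ ∃ j ∈ PySem.List.pyRange (a + 1) n 1, f j = x) :
    ∀ x, x ∈ PySem.Set.add R (f a) ↔ ∃ j ∈ PySem.List.pyRange a n 1, f j = x := by
  intro x
  rw [PySem.Set.mem_add, hR, PySem.List.pyRange_one_cons ha]
  constructor
  · rintro (⟨j, hj, e⟩ | e)
    · exact ⟨j, List.mem_cons_of_mem _ hj, e⟩
    · exact ⟨a, by simp, e.symm⟩
  · rintro ⟨j, hj, e⟩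
    rcases List.mem_cons.mp hj with rfl | hj
    · exact Or.inr e.symm
    · exact Or.inl ⟨j, hj, e⟩

lemma pvL1 (ns : List Int) (v i : Int) :
    ((PySem.List.pyRange (i - 1) (-1) (-1)).any (fun j => v == pvG ns j) = true)
    ↔ ∃ j ∈ PySem.List.pyRange 0 i 1, pvG ns j = v := by
  simp only [List.any_eq_true, PySem.List.mem_pyRange_neg_one, PySem.List.mem_pyRange_one,
    beq_iff_eq]
  constructor <;> rintro ⟨j, hj, hc⟩ <;> exact ⟨j, by omega, by omega⟩

lemma pvL2 (ns : List Int) (v i : Int) :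
    ((PySem.List.pyRange (i - 1) (-1) (-1)).any (fun j => v + (i - 1 - j) + 1 == pvG ns j) = true)
    ↔ ∃ j ∈ PySem.List.pyRange 0 i 1, pvG ns j + j = v + i := by
  simp only [List.any_eq_true, PySem.List.mem_pyRange_neg_one, PySem.List.mem_pyRange_one,
    beq_iff_eq]
  constructor <;> rintro ⟨j, hj, hc⟩ <;> exact ⟨j, by omega, by omega⟩

lemma pvL3 (ns : List Int) (v i : Int) :
    ((PySem.List.pyRange (i - 1) (-1) (-1)).any (fun j => v - (i - 1 - j) - 1 == pvG ns j) = true)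
    ↔ ∃ j ∈ PySem.List.pyRange 0 i 1, pvG ns j - j = v - i := by
  simp only [List.any_eq_true, PySem.List.mem_pyRange_neg_one, PySem.List.mem_pyRange_one,
    beq_iff_eq]
  constructor <;> rintro ⟨j, hj, hc⟩ <;> exact ⟨j, by omega, by omega⟩

lemma pvR1 (ns : List Int) (v i : Int) :
    ((PySem.List.pyRange (i + 1) (ns.length : Int) 1).any (fun j => v == pvG ns j) = true)
    ↔ ∃ j ∈ PySem.List.pyRange (i + 1) (ns.length : Int) 1, pvG ns j = v := by
  simp only [List.any_eq_true, beq_iff_eq]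
  constructor <;> rintro ⟨j, hj, hc⟩ <;> exact ⟨j, hj, by omega⟩

lemma pvR2 (ns : List Int) (v i : Int) :
    ((PySem.List.pyRange (i + 1) (ns.length : Int) 1).any
        (fun j => v + (j - (i + 1)) + 1 == pvG ns j) = true)
    ↔ ∃ j ∈ PySem.List.pyRange (i + 1) (ns.length : Int) 1, pvG ns j - j = v - i := by
  simp only [List.any_eq_true, beq_iff_eq]
  constructor <;> rintro ⟨j, hj, hc⟩ <;> exact ⟨j, hj, by omega⟩

lemma pvR3 (ns : List Int) (v i : Int) :
    ((PySem.List.pyRange (i + 1) (ns.length : Int) 1).any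
        (fun j => v - (j - (i + 1)) - 1 == pvG ns j) = true)
    ↔ ∃ j ∈ PySem.List.pyRange (i + 1) (ns.length : Int) 1, pvG ns j + j = v + i := by
  simp only [List.any_eq_true, beq_iff_eq]
  constructor <;> rintro ⟨j, hj, hc⟩ <;> exact ⟨j, hj, by omega⟩

lemma pvA_eq (ns : List Int) : get_heuristic_value ns = 100 - pvSpecTotal ns := by
  simp only [get_heuristic_value]
  rw [PySem.List.enumerate_eq_map_pyRange (d := 0)]
  simp only [PySem.List.len_eq, ← pvG_def]
  rw [List.foldl_map]
  congr 1
  refine (PySem.List.foldl_congr_mem' (g := fun (total : Int) (i : Int) =>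
      total + (pvHits ns i (pvG ns i) 0 i
        + pvHits ns i (pvG ns i) (i + 1) (ns.length : Int))) _ _ _ ?_).trans ?_
  · intro i hi total
    rw [PySem.List.mem_pyRange_one] at hi
    simp only [pvIteAdd]
    rw [pvAStep_countdown ns (pvG ns i) i.toNat (i - 1) (by omega),
        pvAStep_up ns (pvG ns i) (ns.length : Int) ((ns.length : Int) - (i + 1)).toNat (i + 1)
          (by omega)]
    simp only [Bool.false_or]
    simp only [pvL1 ns (pvG ns i) i, pvL2 ns (pvG ns i) i, pvL3 ns (pvG ns i) i,
      pvR1 ns (pvG ns i) i, pvR2 ns (pvG ns i) i, pvR3 ns (pvG ns i) i, pvHits]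
    split_ifs <;> omega
  · rw [PySem.List.foldl_add]
    unfold pvSpecTotal
    omega

lemma pvSpanL (ns : List Int) :
    ∀ (k : Nat) (a : Int) (R M A : PySem.Set Int), 0 ≤ a → (ns.length : Int) - a = (k : Int) →
    (∀ x, x ∈ R ↔ ∃ j ∈ PySem.List.pyRange 0 a 1, pvG ns j = x) →
    (∀ x, x ∈ M ↔ ∃ j ∈ PySem.List.pyRange 0 a 1, pvG ns j - j = x) →
    (∀ x, x ∈ A ↔ ∃ j ∈ PySem.List.pyRange 0 a 1, pvG ns j + j = x) →
    pvSpan R M A ((PySem.List.pyRange a (ns.length : Int) 1).map (fun j => (j, pvG ns j)))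
    = ((PySem.List.pyRange a (ns.length : Int) 1).map
        (fun i => pvHits ns i (pvG ns i) 0 i)).sum := by
  intro k
  induction k with
  | zero =>
    intro a R M A h0 hk hR hM hA
    rw [PySem.List.pyRange_one_eq_nil (show (ns.length : Int) ≤ a by omega)]
    simp [pvSpan]
  | succ k ih =>
    intro a R M A h0 hk hR hM hA
    rw [PySem.List.pyRange_one_cons (show a < (ns.length : Int) by omega)]
    simp only [List.map_cons, List.sum_cons, pvSpan]
    have hrest := ih (a + 1) (PySem.Set.add R (pvG ns a))
      (PySem.Set.add M (pvG ns a - a)) (PySem.Set.add A (pvG ns a + a))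
      (by omega) (by omega)
      (pvMemSnoc (pvG ns) R a h0 hR)
      (pvMemSnoc (fun j => pvG ns j - j) M a h0 hM)
      (pvMemSnoc (fun j => pvG ns j + j) A a h0 hA)
    rw [hrest]
    congr 1
    simp only [pvHits, PySem.Set.contains_iff, hR, hM, hA]

lemma pvSpanR (ns : List Int) :
    ∀ (k : Nat) (a : Int) (R M A : PySem.Set Int), a + 1 = (k : Int) → a < (ns.length : Int) →
    (∀ x, x ∈ R ↔ ∃ j ∈ PySem.List.pyRange (a + 1) (ns.length : Int) 1, pvG ns j = x) →
    (∀ x, x ∈ M ↔ ∃ j ∈ PySem.List.pyRange (a + 1) (ns.length : Int) 1, pvG ns j - j = x) →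
    (∀ x, x ∈ A ↔ ∃ j ∈ PySem.List.pyRange (a + 1) (ns.length : Int) 1, pvG ns j + j = x) →
    pvSpan R M A ((PySem.List.pyRange a (-1) (-1)).map (fun j => (j, pvG ns j)))
    = ((PySem.List.pyRange a (-1) (-1)).map
        (fun i => pvHits ns i (pvG ns i) (i + 1) (ns.length : Int))).sum := by
  intro k
  induction k with
  | zero =>
    intro a R M A hk ha hR hM hA
    rw [PySem.List.pyRange_neg_one_eq_nil (show a ≤ -1 by omega)]
    simp [pvSpan]
  | succ k ih =>
    intro a R M A hk ha hR hM hA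
    rw [PySem.List.pyRange_neg_one_cons (show (-1 : Int) < a by omega)]
    simp only [List.map_cons, List.sum_cons, pvSpan]
    have e : a - 1 + 1 = a := by ring
    have hrest := ih (a - 1) (PySem.Set.add R (pvG ns a))
      (PySem.Set.add M (pvG ns a - a)) (PySem.Set.add A (pvG ns a + a))
      (by omega) (by omega)
      (fun x => by rw [e]; exact pvMemConsDown (pvG ns) R a (ns.length : Int) ha hR x)
      (fun x => by rw [e]; exact pvMemConsDown (fun j => pvG ns j - j) M a (ns.length : Int) ha hM x)
      (fun x => by rw [e]; exact pvMemConsDown (fun j => pvG ns j + j) A a (ns.length : Int) ha hA x)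
    rw [hrest]
    congr 1
    simp only [pvHits, PySem.Set.contains_iff, hR, hM, hA]

lemma pvB_eq (ns : List Int) : get_heuristic_value_alt ns = 100 - pvSpecTotal ns := by
  simp only [get_heuristic_value_alt]
  rw [PySem.List.enumerate_eq_map_pyRange (d := 0)]
  simp only [PySem.List.len_eq, ← pvG_def]
  have hmap : ∀ (st : Int × PySem.Set Int × PySem.Set Int × PySem.Set Int),
      (PySem.List.pyRange ((ns.length : Int) - 1) (-1) (-1)).foldl
        (fun s i => pvBStep s (i, pvG ns i)) st
      = ((PySem.List.pyRange ((ns.length : Int) - 1) (-1) (-1)).map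
          (fun i => (i, pvG ns i))).foldl pvBStep st := by
    intro st; rw [List.foldl_map]
  rw [hmap, pvBfold, pvBfold]
  have hempty : ∀ (f : Int → Int) (x : Int),
      x ∈ PySem.Set.empty ↔ ∃ j ∈ PySem.List.pyRange 0 0 1, f j = x := by
    intro f x
    rw [PySem.List.pyRange_one_eq_nil (le_refl 0)]
    simp [PySem.Set.empty]
  have hempty' : ∀ (f : Int → Int) (x : Int),
      x ∈ PySem.Set.empty
      ↔ ∃ j ∈ PySem.List.pyRange (((ns.length : Int) - 1) + 1) (ns.length : Int) 1, f j = x := by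
    intro f x
    rw [PySem.List.pyRange_one_eq_nil (by omega)]
    simp [PySem.Set.empty]
  rw [pvSpanL ns ns.length 0 PySem.Set.empty PySem.Set.empty PySem.Set.empty (le_refl 0)
      (by omega) (hempty _) (hempty _) (hempty _),
    pvSpanR ns ns.length ((ns.length : Int) - 1) PySem.Set.empty PySem.Set.empty PySem.Set.empty
      (by omega) (by omega) (hempty' _) (hempty' _) (hempty' _)]
  rw [PySem.List.pyRange_neg_one_eq_reverse]
  rw [show ((-1 : Int) + 1) = 0 from by ring, show (ns.length : Int) - 1 + 1 = (ns.length : Int)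
    from by ring]
  rw [List.map_reverse, List.sum_reverse]
  unfold pvSpecTotal
  rw [PySem.List.sum_map_add_int]
  omega

-- ===== VERDICT (by name: the statement is the Claim_ definition above) =====
theorem get_heuristic_value_spec : Claim_equal_get_heuristic_value := by
  intro ns _
  unfold Spec_get_heuristic_value
  rw [pvA_eq, pvB_eq]
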